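-- pv_equiv track=rewrite | github.com/matej-melansek/Advent_of_Code_2024 | day5.py | good_bad_production
-- ===== SOURCE A (Python) =====
-- def good_bad_production(production,rules):
--     good = []
--     bad = []
--     for i in range(len(production)):
--         product = production[i]
--         indexes = []
--         for j in range(len(rules)):
--             rule1 = rules[j][0]
--             rule2 = rules[j][1]
--             if (rule1 in product) and (rule2 in product):
--                 indexes.append(product.index(rule1) < product.index(rule2))
--         if list(set(indexes)) == [True]:
--             good.append(product)
--         else:
--             bad.append(product)
--     return [good,bad]
-- ===== SOURCE B (Python) =====
-- def good_bad_production(production, rules):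
--     # Build a predecessor index: pred[b] = all a with a rule (a, b)
--     pred = {}
--     for r in rules:
--         pred.setdefault(r[1], []).append(r[0])
--     good, bad = [], []
--     for product in production:
--         pset = set(product)
--         seen = set()
--         applied = False
--         violation = False
--         for e in product:
--             if e in seen:
--                 continue
--             for a in pred.get(e, []):
--                 if a in pset:
--                     applied = True
--                     if a not in seen:
--                         violation = True
--             seen.add(e)
--         if applied and not violation:
--             good.append(product)
--         else:
--             bad.append(product)
--     return [good, bad]
-- ===== Notes on version B (the rewrite author's own statement) =====
-- stated objective: faster
-- what changed: A rescans the full rule list for every product and calls list.index twice per applicable rule; B builds a predecessor index from the rules once and classifies each product with a single left-to-right scan keeping a seen-set, deriving 'some rule applies' and 'some rule violated' flags on the fly.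
-- outside the precondition, e.g. on good_bad_production([], [[1]]): A returns [[], []], B raises IndexError
import Mathlib
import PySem

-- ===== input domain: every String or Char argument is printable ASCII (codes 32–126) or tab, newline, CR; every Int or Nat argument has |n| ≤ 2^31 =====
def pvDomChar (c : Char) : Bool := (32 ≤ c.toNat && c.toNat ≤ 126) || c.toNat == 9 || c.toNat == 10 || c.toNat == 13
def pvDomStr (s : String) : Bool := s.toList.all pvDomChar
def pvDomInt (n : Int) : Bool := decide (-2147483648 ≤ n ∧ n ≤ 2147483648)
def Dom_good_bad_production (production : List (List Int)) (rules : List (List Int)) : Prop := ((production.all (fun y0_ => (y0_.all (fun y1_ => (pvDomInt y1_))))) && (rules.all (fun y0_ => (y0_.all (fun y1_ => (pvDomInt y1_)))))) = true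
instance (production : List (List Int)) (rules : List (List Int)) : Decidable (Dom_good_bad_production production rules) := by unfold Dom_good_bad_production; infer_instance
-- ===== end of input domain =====

-- B replaces A's per-product rescan of all rules (with repeated list.index calls) by a
-- predecessor index built once from the rules plus a single left-to-right seen-set scan
-- of each product; the return values are proved equal under Pre_.

-- ===== PORT A =====
def good_bad_production (production : List (List Int)) (rules : List (List Int)) : List (List (List Int)) :=
  let gb := production.foldl (fun (gb : List (List Int) × List (List Int)) product =>
    let indexes : List Bool := rules.foldl (fun (acc : List Bool) rule =>
      let rule1 := (PySem.List.pyGet? rule 0).getD 0   -- rules[j][0]; some under Pre_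
      let rule2 := (PySem.List.pyGet? rule 1).getD 0   -- rules[j][1]; some under Pre_
      if rule1 ∈ product ∧ rule2 ∈ product then
        acc ++ [decide ((PySem.List.index? product rule1).getD 0 < (PySem.List.index? product rule2).getD 0)]
      else acc) []
    -- list(set(indexes)) == [True]: exact despite Python's set iteration order — only a
    -- singleton set can compare equal to [True], and a singleton has one order.
    if PySem.Set.ofList indexes = [true] then (gb.1 ++ [product], gb.2)
    else (gb.1, gb.2 ++ [product])) ([], [])
  [gb.1, gb.2]

-- ===== PORT B =====
def good_bad_production_alt (production : List (List Int)) (rules : List (List Int)) : List (List (List Int)) :=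
  -- pred.setdefault(r[1], []).append(r[0]) ported as insert of the extended value:
  -- same key positions (new keys append, existing keep place) and same values.
  let pred : PySem.Dict Int (List Int) := rules.foldl (fun d r =>
    d.modify ((PySem.List.pyGet? r 1).getD 0) [] (· ++ [(PySem.List.pyGet? r 0).getD 0])) PySem.Dict.empty
  let gb := production.foldl (fun (gb : List (List Int) × List (List Int)) product =>
    let pset : PySem.Set Int := PySem.Set.ofList product
    let st := product.foldl (fun (st : PySem.Set Int × Bool × Bool) e =>
      if e ∈ st.1 then st
      else
        let av := (pred.getD e []).foldl (fun (av : Bool × Bool) a =>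
          if a ∈ pset then (true, if a ∉ st.1 then true else av.2) else av) (st.2.1, st.2.2)
        (PySem.Set.add st.1 e, av.1, av.2)) (PySem.Set.empty, false, false)
    if st.2.1 && !st.2.2 then (gb.1 ++ [product], gb.2)
    else (gb.1, gb.2 ++ [product])) ([], [])
  [gb.1, gb.2]

-- ===== PRECONDITION & SPEC =====
-- Pre_ excludes rule rows with fewer than two entries (malformed rules): A raises
-- IndexError on them whenever production is nonempty, and on the remaining corner
-- (empty production together with a short rule row) A returns [[], []] without ever
-- reading the rules, while B raises building its rule index up front.
def Pre_good_bad_production (production : List (List Int)) (rules : List (List Int)) : Prop :=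
  ∀ r ∈ rules, 2 ≤ r.length
instance (production : List (List Int)) (rules : List (List Int)) : Decidable (Pre_good_bad_production production rules) := by unfold Pre_good_bad_production; infer_instance
def pvWitness_good_bad_production : List (List Int) × List (List Int) := ([[1, 2], [2, 1]], [[1, 2]])
def Spec_good_bad_production (production : List (List Int)) (rules : List (List Int)) (out : List (List (List Int))) : Prop := out = good_bad_production_alt production rules
instance (production : List (List Int)) (rules : List (List Int)) (out : List (List (List Int))) : Decidable (Spec_good_bad_production production rules out) := by unfold Spec_good_bad_production; infer_instance

-- ===== CLAIM (what is proved, stated in full; the proofs are below) =====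
def Claim_equal_good_bad_production : Prop := ∀ (production : List (List Int)) (rules : List (List Int)), Dom_good_bad_production production rules → Pre_good_bad_production production rules → Spec_good_bad_production production rules (good_bad_production production rules)

-- ===== LEMMAS AND PROOFS =====

-- first / second entry of a rule row; first-occurrence index of a value in a product
abbrev pvR0 (r : List Int) : Int := (PySem.List.pyGet? r 0).getD 0
abbrev pvR1 (r : List Int) : Int := (PySem.List.pyGet? r 1).getD 0
abbrev pvIdx (p : List Int) (v : Int) : Nat := (PySem.List.index? p v).getD 0
-- "some rule whose right side already occurs in pre applies to product p"
abbrev pvAppl (p : List Int) (rules : List (List Int)) (pre : List Int) : Prop :=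
  ∃ r ∈ rules, pvR1 r ∈ pre ∧ pvR0 r ∈ p
-- "… and that rule is violated in p (left side not strictly before right side)"
abbrev pvViol (p : List Int) (rules : List (List Int)) (pre : List Int) : Prop :=
  ∃ r ∈ rules, pvR1 r ∈ pre ∧ pvR0 r ∈ p ∧ ¬ (pvIdx p (pvR0 r) < pvIdx p (pvR1 r))
-- B's predecessor index and the per-element body of B's scan loop (defeq to the port's)
def pvPred (rules : List (List Int)) : PySem.Dict Int (List Int) :=
  rules.foldl (fun d r =>
    d.modify ((PySem.List.pyGet? r 1).getD 0) [] (· ++ [(PySem.List.pyGet? r 0).getD 0])) PySem.Dict.empty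
def pvStep (rules : List (List Int)) (p : List Int) (st : PySem.Set Int × Bool × Bool) (e : Int) :
    PySem.Set Int × Bool × Bool :=
  if e ∈ st.1 then st
  else
    let av := ((pvPred rules).getD e []).foldl
      (fun (av : Bool × Bool) a => if a ∈ PySem.Set.ofList p then (true, if a ∉ st.1 then true else av.2) else av) (st.2.1, st.2.2)
    (PySem.Set.add st.1 e, av.1, av.2)

theorem pv_all_true_foldl_add (t : List Bool) (h : ∀ x ∈ t, x = true) :
    t.foldl PySem.Set.add [true] = [true] := by
  induction t with
  | nil => rfl
  | cons a t ih =>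
    have ha := h a (by simp)
    subst ha
    simp only [List.foldl_cons]
    have hadd : PySem.Set.add [true] true = [true] := by decide
    rw [hadd]
    exact ih (fun x hx => h x (by simp [hx]))

theorem pv_ofList_eq_true_singleton (l : List Bool) :
    PySem.Set.ofList l = [true] ↔ (true ∈ l ∧ false ∉ l) := by
  constructor
  · intro h
    constructor
    · have : true ∈ PySem.Set.ofList l := by rw [h]; simp
      exact (PySem.Set.mem_ofList _ _).1 this
    · intro hf
      have : false ∈ PySem.Set.ofList l := (PySem.Set.mem_ofList _ _).2 hf
      rw [h] at this; simp at this
  · rintro ⟨ht, hf⟩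
    have hall : ∀ x ∈ l, x = true := by
      intro x hx; cases x
      · exact absurd hx hf
      · rfl
    cases l with
    | nil => simp at ht
    | cons a t =>
      have ha := hall a (by simp)
      subst ha
      rw [PySem.Set.ofList_eq_foldl]
      simp only [List.foldl_cons]
      have hadd : PySem.Set.add ([] : List Bool) true = [true] := by decide
      rw [hadd]
      exact pv_all_true_foldl_add t (fun x hx => hall x (by simp [hx]))

theorem pv_pred_getD (rules : List (List Int)) (e : Int) :
    (pvPred rules).getD e [] = ((rules.filter (fun r => pvR1 r == e)).map pvR0) := by
  have h := List.foldl_map (f := fun r : List Int => (pvR1 r, pvR0 r))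
    (g := fun (d : PySem.Dict Int (List Int)) (p : Int × Int) => d.modify p.1 [] (· ++ [p.2]))
    (l := rules) (init := (PySem.Dict.empty : PySem.Dict Int (List Int)))
  simp only [pvR0, pvR1] at h
  rw [pvPred, ← h, PySem.Dict.getD_foldl_modify_append]
  simp [List.filter_map, List.map_map, Function.comp_def]

theorem pv_idx_lt (pre rest : List Int) (e a : Int) (he : e ∉ pre) (ha : a ∈ pre ++ e :: rest) :
    pvIdx (pre ++ e :: rest) a < pvIdx (pre ++ e :: rest) e ↔ a ∈ pre := by
  have hE : PySem.List.index? (pre ++ e :: rest) e = some pre.length :=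
    (PySem.List.index?_eq_some_iff _ _ _).mpr ⟨pre, rest, rfl, rfl, he⟩
  have hsome : (PySem.List.index? (pre ++ e :: rest) a).isSome :=
    (PySem.List.index?_isSome_iff _ _).mpr ha
  obtain ⟨k, hk⟩ := Option.isSome_iff_exists.mp hsome
  obtain ⟨hklt, hget, hmin⟩ := PySem.List.getElem_of_index?_eq_some hk
  simp only [pvIdx, hE, hk, Option.getD_some]
  constructor
  · intro hlt
    have h2 : (pre ++ e :: rest)[k] = pre[k]'hlt := List.getElem_append_left hlt
    rw [hget] at h2
    exact h2 ▸ List.getElem_mem hlt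
  · intro hmem
    obtain ⟨j, hj, hje⟩ := List.getElem_of_mem hmem
    by_contra hnot
    push Not at hnot
    -- a occurs in pre at j < pre.length ≤ k, contradicting minimality of k
    have hxj : (pre ++ e :: rest)[j]'(by simp; omega) = pre[j]'hj := List.getElem_append_left hj
    exact hmin j (lt_of_lt_of_le hj hnot) (by rw [hxj, hje])

theorem pv_inner (pset seen : PySem.Set Int) (L : List Int) (ap vi : Bool) :
    L.foldl (fun (av : Bool × Bool) a => if a ∈ pset then (true, if a ∉ seen then true else av.2) else av) (ap, vi)
    = (ap || L.any (fun a => decide (a ∈ pset)),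
       vi || L.any (fun a => decide (a ∈ pset ∧ a ∉ seen))) := by
  induction L generalizing ap vi with
  | nil => simp
  | cons a L ih =>
    simp only [List.foldl_cons, List.any_cons]
    by_cases hp : a ∈ pset
    · rw [if_pos hp, ih]
      by_cases hs : a ∉ seen
      · simp [hp, hs]
      · simp [hp, hs]
    · rw [if_neg hp, ih]
      simp [hp]

theorem pv_step_eq (rules : List (List Int)) (pre rest : List Int) (e : Int) :
    pvStep rules (pre ++ e :: rest) (PySem.Set.ofList pre, decide (pvAppl (pre ++ e :: rest) rules pre), decide (pvViol (pre ++ e :: rest) rules pre)) e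
    = (PySem.Set.ofList (pre ++ [e]), decide (pvAppl (pre ++ e :: rest) rules (pre ++ [e])), decide (pvViol (pre ++ e :: rest) rules (pre ++ [e]))) := by
  have hofl : PySem.Set.ofList (pre ++ [e]) = PySem.Set.add (PySem.Set.ofList pre) e := by
    rw [PySem.Set.ofList_eq_foldl, PySem.Set.ofList_eq_foldl, List.foldl_append]; rfl
  by_cases hmem : e ∈ pre
  · -- e already seen: the scan skips it and nothing changes
    have hm : ∀ x : Int, x ∈ pre ++ [e] ↔ x ∈ pre := by
      intro x; simp only [List.mem_append, List.mem_singleton]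
      exact ⟨fun h => h.elim id (fun h' => h' ▸ hmem), Or.inl⟩
    have h1 : PySem.Set.ofList (pre ++ [e]) = PySem.Set.ofList pre := by
      rw [hofl]; simp [PySem.Set.add]; exact hmem
    have h2 : pvAppl (pre ++ e :: rest) rules (pre ++ [e]) ↔ pvAppl (pre ++ e :: rest) rules pre := by
      constructor
      · rintro ⟨r, hr, ha, hb⟩; exact ⟨r, hr, (hm _).mp ha, hb⟩
      · rintro ⟨r, hr, ha, hb⟩; exact ⟨r, hr, (hm _).mpr ha, hb⟩
    have h3 : pvViol (pre ++ e :: rest) rules (pre ++ [e]) ↔ pvViol (pre ++ e :: rest) rules pre := by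
      constructor
      · rintro ⟨r, hr, ha, hb⟩; exact ⟨r, hr, (hm _).mp ha, hb⟩
      · rintro ⟨r, hr, ha, hb⟩; exact ⟨r, hr, (hm _).mpr ha, hb⟩
    rw [pvStep, if_pos ((PySem.Set.mem_ofList _ _).mpr hmem), h1,
      decide_eq_decide.mpr h2, decide_eq_decide.mpr h3]
  · -- e processed for the first time: a ∈ seen ↔ first occurrence of a before e's
    rw [pvStep, if_neg (fun hc => hmem ((PySem.Set.mem_ofList _ _).mp hc))]
    simp only [pv_pred_getD, pv_inner]
    have hLany : ∀ (f : Int → Bool),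
        (((rules.filter (fun r => pvR1 r == e)).map pvR0).any f)
        = rules.any (fun r => (pvR1 r == e) && f (pvR0 r)) := by
      intro f; simp [List.any_map, List.any_filter]
    have hap : (decide (pvAppl (pre ++ e :: rest) rules pre) || ((rules.filter (fun r => pvR1 r == e)).map pvR0).any (fun a => decide (a ∈ PySem.Set.ofList (pre ++ e :: rest))))
        = decide (pvAppl (pre ++ e :: rest) rules (pre ++ [e])) := by
      rw [hLany]
      apply Bool.eq_iff_iff.mpr
      simp only [Bool.or_eq_true, decide_eq_true_eq, List.any_eq_true, Bool.and_eq_true,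
        beq_iff_eq, PySem.Set.mem_ofList]
      constructor
      · rintro (⟨r, hr, ha, hb⟩ | ⟨r, hr, ha, hb⟩)
        · exact ⟨r, hr, by simp [List.mem_append, ha], hb⟩
        · exact ⟨r, hr, by simp [List.mem_append, ha], hb⟩
      · rintro ⟨r, hr, ha, hb⟩
        rcases (List.mem_append.mp ha) with h' | h'
        · exact Or.inl ⟨r, hr, h', hb⟩
        · exact Or.inr ⟨r, hr, List.mem_singleton.mp h', hb⟩
    have hvi : (decide (pvViol (pre ++ e :: rest) rules pre) || ((rules.filter (fun r => pvR1 r == e)).map pvR0).any (fun a => decide (a ∈ PySem.Set.ofList (pre ++ e :: rest) ∧ a ∉ PySem.Set.ofList pre)))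
        = decide (pvViol (pre ++ e :: rest) rules (pre ++ [e])) := by
      rw [hLany]
      apply Bool.eq_iff_iff.mpr
      simp only [Bool.or_eq_true, decide_eq_true_eq, List.any_eq_true, Bool.and_eq_true,
        beq_iff_eq, PySem.Set.mem_ofList]
      constructor
      · rintro (⟨r, hr, ha, hb, hc⟩ | ⟨r, hr, ha, ⟨hb, hc⟩⟩)
        · exact ⟨r, hr, by simp [List.mem_append, ha], hb, hc⟩
        · refine ⟨r, hr, by simp [List.mem_append, ha], hb, ?_⟩
          rw [ha]
          exact fun hlt => hc ((pv_idx_lt pre rest e (pvR0 r) hmem hb).mp hlt)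
      · rintro ⟨r, hr, ha, hb, hc⟩
        rcases (List.mem_append.mp ha) with h' | h'
        · exact Or.inl ⟨r, hr, h', hb, hc⟩
        · have he' := List.mem_singleton.mp h'
          refine Or.inr ⟨r, hr, he', hb, ?_⟩
          rw [he'] at hc
          exact fun hin => hc ((pv_idx_lt pre rest e (pvR0 r) hmem hb).mpr hin)
    rw [hap, hvi, ← hofl]

theorem pv_scan (rules : List (List Int)) :
    ∀ (rest pre : List Int),
    rest.foldl (pvStep rules (pre ++ rest))
      (PySem.Set.ofList pre, decide (pvAppl (pre ++ rest) rules pre), decide (pvViol (pre ++ rest) rules pre))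
    = (PySem.Set.ofList (pre ++ rest), decide (pvAppl (pre ++ rest) rules (pre ++ rest)), decide (pvViol (pre ++ rest) rules (pre ++ rest))) := by
  intro rest
  induction rest with
  | nil => intro pre; simp
  | cons e rest ih =>
    intro pre
    rw [List.foldl_cons, pv_step_eq rules pre rest e]
    have happ : pre ++ e :: rest = (pre ++ [e]) ++ rest := by rw [List.append_assoc]; rfl
    have h := ih (pre ++ [e])
    rw [← happ] at h
    exact h

theorem pv_main (production rules : List (List Int)) :
    good_bad_production production rules = good_bad_production_alt production rules := by
  unfold good_bad_production good_bad_production_alt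
  have hfold : production.foldl (fun (gb : List (List Int) × List (List Int)) product =>
      let indexes : List Bool := rules.foldl (fun (acc : List Bool) rule =>
        let rule1 := (PySem.List.pyGet? rule 0).getD 0
        let rule2 := (PySem.List.pyGet? rule 1).getD 0
        if rule1 ∈ product ∧ rule2 ∈ product then
          acc ++ [decide ((PySem.List.index? product rule1).getD 0 < (PySem.List.index? product rule2).getD 0)]
        else acc) []
      if PySem.Set.ofList indexes = [true] then (gb.1 ++ [product], gb.2)
      else (gb.1, gb.2 ++ [product])) ([], [])
    = production.foldl (fun (gb : List (List Int) × List (List Int)) product =>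
      let st := product.foldl (pvStep rules product) (PySem.Set.empty, false, false)
      if st.2.1 && !st.2.2 then (gb.1 ++ [product], gb.2)
      else (gb.1, gb.2 ++ [product])) ([], []) := by
    apply PySem.List.foldl_congr_mem
    intro acc x hx
    simp only
    have hscan := pv_scan rules x []
    simp only [List.nil_append] at hscan
    have hscan' : x.foldl (pvStep rules x) ((PySem.Set.empty : PySem.Set Int), false, false)
        = (PySem.Set.ofList x, decide (pvAppl x rules x), decide (pvViol x rules x)) := by
      convert hscan using 2 <;> simp [PySem.Set.empty]
    rw [hscan']
    rw [PySem.List.foldl_append_ite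
      (p := fun rule : List Int => (PySem.List.pyGet? rule 0).getD 0 ∈ x ∧ (PySem.List.pyGet? rule 1).getD 0 ∈ x)
      (f := fun rule : List Int => decide ((PySem.List.index? x ((PySem.List.pyGet? rule 0).getD 0)).getD 0 < (PySem.List.index? x ((PySem.List.pyGet? rule 1).getD 0)).getD 0))]
    -- A's verdict (at least one applicable rule, each with first index in order)
    -- iff B's flags (applied, no violation)
    have hcond : (PySem.Set.ofList ([] ++ (rules.filter (fun rule => decide (pvR0 rule ∈ x ∧ pvR1 rule ∈ x))).map
          (fun rule => decide (pvIdx x (pvR0 rule) < pvIdx x (pvR1 rule)))) = [true])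
        ↔ ((decide (pvAppl x rules x) && !decide (pvViol x rules x)) = true) := by
      rw [List.nil_append, pv_ofList_eq_true_singleton]
      simp only [Bool.and_eq_true, Bool.not_eq_true', decide_eq_true_eq, decide_eq_false_iff_not,
        List.mem_map, List.mem_filter, decide_eq_true_eq]
      constructor
      · rintro ⟨⟨r, ⟨hr, hg⟩, hc⟩, hnf⟩
        refine ⟨⟨r, hr, hg.2, hg.1⟩, ?_⟩
        rintro ⟨s, hs, h1, h0, hnc⟩
        exact hnf ⟨s, ⟨hs, ⟨h0, h1⟩⟩, hnc⟩
      · rintro ⟨⟨r, hr, h1, h0⟩, hnv⟩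
        constructor
        · refine ⟨r, ⟨hr, ⟨h0, h1⟩⟩, ?_⟩
          by_contra hnc
          exact hnv ⟨r, hr, h1, h0, hnc⟩
        · rintro ⟨s, ⟨hs, hg⟩, hfc⟩
          exact hnv ⟨s, hs, hg.2, hg.1, hfc⟩
    split_ifs with hA hB hB
    · rfl
    · exact absurd (hcond.mp hA) hB
    · exact absurd (hcond.mpr hB) hA
    · rfl
  exact congrArg (fun gb : List (List Int) × List (List Int) => [gb.1, gb.2]) hfold

-- ===== VERDICT (by name: the statement is the Claim_ definition above) =====
theorem good_bad_production_spec : Claim_equal_good_bad_production := by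
  intro production rules _ _
  exact pv_main production rules
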